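-- pv_equiv track=rewrite | github.com/TianyiLan/EdgeLLM-Systems | benchmarks/profiling/run_exp001_v2_1.py | build_test_configs
-- ===== SOURCE A (Python) =====
-- def build_test_configs(prompt_lengths: list[int], gen_lengths: list[int]) -> list[tuple[int, int]]:
--     """Build the prompt_len x gen_len matrix without duplicate configs."""
--     pairs = [(int(prompt_len), int(gen_len)) for prompt_len in prompt_lengths for gen_len in gen_lengths]
--     seen = set()
--     unique_pairs = []
--     for pair in pairs:
--         if pair not in seen:
--             seen.add(pair)
--             unique_pairs.append(pair)
--     return unique_pairs
-- ===== SOURCE B (Python) =====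
-- def build_test_configs(prompt_lengths: list[int], gen_lengths: list[int]) -> list[tuple[int, int]]:
--     """Dedup each axis with dict.fromkeys (first occurrences, in order), then take the product."""
--     unique_prompts = list(dict.fromkeys(int(v) for v in prompt_lengths))
--     unique_gens = list(dict.fromkeys(int(v) for v in gen_lengths))
--     return [(p, g) for p in unique_prompts for g in unique_gens]
-- ===== Notes on version B (the rewrite author's own statement) =====
-- stated objective: idiomatic
-- what changed: A materialises the full n*m Cartesian product and removes duplicate pairs with a forward seen-set loop; B never deduplicates pairs at all: it deduplicates each axis with the idiomatic dict.fromkeys and emits the product of the cleaned axes, duplicate-free by construction.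
import Mathlib
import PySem

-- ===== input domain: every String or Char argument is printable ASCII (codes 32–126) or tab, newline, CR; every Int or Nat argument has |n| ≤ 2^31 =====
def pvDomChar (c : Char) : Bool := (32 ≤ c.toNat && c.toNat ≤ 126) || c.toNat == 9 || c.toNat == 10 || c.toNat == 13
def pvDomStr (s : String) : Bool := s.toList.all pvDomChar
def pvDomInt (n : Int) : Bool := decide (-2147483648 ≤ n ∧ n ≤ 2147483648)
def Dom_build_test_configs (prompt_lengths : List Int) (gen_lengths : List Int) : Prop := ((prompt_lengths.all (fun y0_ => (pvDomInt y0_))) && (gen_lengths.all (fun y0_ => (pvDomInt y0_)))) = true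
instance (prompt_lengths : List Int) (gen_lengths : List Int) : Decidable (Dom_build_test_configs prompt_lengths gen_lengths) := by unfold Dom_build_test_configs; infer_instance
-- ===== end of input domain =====

-- B deduplicates each axis with dict.fromkeys (first occurrences, in order) and emits the
-- product of the cleaned axes — duplicate-free by construction, no pair-level seen set and
-- no n*m dedup pass; an idiomatic decomposition, not claimed faster.

-- ===== PORT A =====
-- pairs = [(int(pl), int(gl)) …]; then: seen = set(); for pair in pairs: if pair not in seen: add + append.
def build_test_configs (prompt_lengths : List Int) (gen_lengths : List Int) : List (Int × Int) :=
  let pairs := prompt_lengths.flatMap (fun prompt_len => gen_lengths.map (fun gen_len => (prompt_len, gen_len)))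
  (pairs.foldl
    (fun (st : PySem.Set (Int × Int) × List (Int × Int)) pair =>
      if PySem.Set.contains st.1 pair then st else (PySem.Set.add st.1 pair, st.2 ++ [pair]))
    (PySem.Set.empty, [])).2

-- ===== PORT B =====
-- list(dict.fromkeys(...)) per axis = PySem.List.dedup (first occurrences, in order), then the product.
def build_test_configs_alt (prompt_lengths : List Int) (gen_lengths : List Int) : List (Int × Int) :=
  let unique_prompts := PySem.List.dedup prompt_lengths
  let unique_gens := PySem.List.dedup gen_lengths
  unique_prompts.flatMap (fun p => unique_gens.map (fun g => (p, g)))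

-- ===== PRECONDITION & SPEC =====
def Spec_build_test_configs (prompt_lengths : List Int) (gen_lengths : List Int) (out : List (Int × Int)) : Prop := out = build_test_configs_alt prompt_lengths gen_lengths
instance (prompt_lengths : List Int) (gen_lengths : List Int) (out : List (Int × Int)) : Decidable (Spec_build_test_configs prompt_lengths gen_lengths out) := by unfold Spec_build_test_configs; infer_instance

-- ===== CLAIM (what is proved, stated in full; the proofs are below) =====
def Claim_equal_build_test_configs : Prop := ∀ (prompt_lengths : List Int) (gen_lengths : List Int), Dom_build_test_configs prompt_lengths gen_lengths → Spec_build_test_configs prompt_lengths gen_lengths (build_test_configs prompt_lengths gen_lengths)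

-- ===== LEMMAS AND PROOFS =====

-- A's seen-set dedup loop, started with list accumulator = seen set s, computes foldl Set.add s.
theorem pvALoop_aux {α : Type} [BEq α] (xs : List α) (s : List α) :
    (xs.foldl
      (fun (st : PySem.Set α × List α) x =>
        if PySem.Set.contains st.1 x then st else (PySem.Set.add st.1 x, st.2 ++ [x]))
      (s, s)).2 = xs.foldl PySem.Set.add s := by
  induction xs generalizing s with
  | nil => rfl
  | cons x xs ih =>
    simp only [List.foldl]
    by_cases h : s.contains x = true
    · have hadd : PySem.Set.add s x = s := by simp [PySem.Set.add, PySem.Set.contains, h]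
      simp only [PySem.Set.contains, h, if_true]
      rw [hadd]; exact ih s
    · have hadd : PySem.Set.add s x = s ++ [x] := by simp [PySem.Set.add, PySem.Set.contains, h]
      simp only [PySem.Set.contains, h, if_false]
      rw [hadd]; exact ih (s ++ [x])

-- foldl Set.add over a split accumulator: the prefix s₁ is frozen, its members are skipped.
theorem foldl_add_append {α : Type} [BEq α] (xs : List α) (s₁ s₂ : List α) :
    xs.foldl PySem.Set.add (s₁ ++ s₂)
      = s₁ ++ (xs.filter (fun x => ¬ s₁.contains x)).foldl PySem.Set.add s₂ := by
  induction xs generalizing s₂ with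
  | nil => rfl
  | cons x xs ih =>
    simp only [List.foldl, List.filter]
    by_cases h : s₁.contains x
    · have hx : PySem.Set.add (s₁ ++ s₂) x = s₁ ++ s₂ := by
        simp [PySem.Set.add, PySem.Set.contains, List.contains_append, h]
      simp [h, hx, ih]
    · by_cases h2 : s₂.contains x
      · have hx : PySem.Set.add (s₁ ++ s₂) x = s₁ ++ s₂ := by
          simp [PySem.Set.add, PySem.Set.contains, List.contains_append, h2]
        have hx2 : PySem.Set.add s₂ x = s₂ := by simp [PySem.Set.add, PySem.Set.contains, h2]
        simp [h, hx, hx2, List.foldl, ih]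
      · have hx : PySem.Set.add (s₁ ++ s₂) x = s₁ ++ (s₂ ++ [x]) := by
          simp [PySem.Set.add, PySem.Set.contains, List.contains_append, h, h2]
        have hx2 : PySem.Set.add s₂ x = s₂ ++ [x] := by simp [PySem.Set.add, PySem.Set.contains, h2]
        simp [h, hx, hx2, List.foldl, ih]

theorem ofList_append {α : Type} [BEq α] (xs ys : List α) :
    PySem.Set.ofList (xs ++ ys)
      = PySem.Set.ofList xs
        ++ PySem.Set.ofList (ys.filter (fun y => ¬ (PySem.Set.ofList xs).contains y)) := by
  have h := foldl_add_append ys (PySem.Set.ofList xs) []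
  simpa [PySem.Set.ofList, List.foldl_append] using h

-- ofList peels its head: ofList (a :: p) = a :: ofList (p with a removed).
theorem ofList_cons_filter {α : Type} [DecidableEq α] (a : α) (p : List α) :
    PySem.Set.ofList (a :: p) = a :: PySem.Set.ofList (p.filter (fun x => x ≠ a)) := by
  have h := ofList_append [a] p
  have h1 : PySem.Set.ofList [a] = [a] := rfl
  have h2 : (p.filter (fun y => ¬ (PySem.Set.ofList [a]).contains y))
      = p.filter (fun x => x ≠ a) := by
    apply List.filter_congr
    intro z _
    simp [h1, List.contains_iff_mem]
  simpa [h1, h2] using h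

-- dedup commutes with mapping an injective function.
theorem foldl_add_map {α β : Type} [BEq α] [LawfulBEq α] [BEq β] [LawfulBEq β]
    (f : α → β) (hf : Function.Injective f) (xs : List α) (s : List α) :
    (xs.map f).foldl PySem.Set.add (s.map f) = (xs.foldl PySem.Set.add s).map f := by
  induction xs generalizing s with
  | nil => rfl
  | cons x xs ih =>
    by_cases h : x ∈ s
    · have h1 : PySem.Set.add (s.map f) (f x) = s.map f := by
        have hm : f x ∈ s.map f := List.mem_map_of_mem h
        simp [PySem.Set.add, PySem.Set.contains, List.contains_iff_mem, hm]
      have h2 : PySem.Set.add s x = s := by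
        simp [PySem.Set.add, PySem.Set.contains, List.contains_iff_mem, h]
      simp only [List.map_cons, List.foldl, h1, h2]
      exact ih s
    · have hfx : f x ∉ s.map f := by
        intro hm
        rcases List.mem_map.mp hm with ⟨y, hy, hxy⟩
        exact h (hf hxy ▸ hy)
      have h1 : PySem.Set.add (s.map f) (f x) = (s ++ [x]).map f := by
        simp [PySem.Set.add, PySem.Set.contains, List.contains_iff_mem, hfx]
      have h2 : PySem.Set.add s x = s ++ [x] := by
        simp [PySem.Set.add, PySem.Set.contains, List.contains_iff_mem, h]
      simp only [List.map_cons, List.foldl, h1, h2]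
      exact ih (s ++ [x])

theorem ofList_map {α β : Type} [BEq α] [LawfulBEq α] [BEq β] [LawfulBEq β]
    (f : α → β) (hf : Function.Injective f) (xs : List α) :
    PySem.Set.ofList (xs.map f) = (PySem.Set.ofList xs).map f := by
  simpa [PySem.Set.ofList] using foldl_add_map f hf xs []

-- Filtering the product by "first component ≠ a" = filtering the left axis by "≠ a".
theorem filter_flatMap_fst {α : Type} [DecidableEq α] (g : List α) (a : α) (p : List α) :
    ((p.flatMap (fun x => g.map (fun y => (x, y)))).filter (fun z => z.1 ≠ a))
      = (p.filter (fun x => x ≠ a)).flatMap (fun x => g.map (fun y => (x, y))) := by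
  induction p with
  | nil => rfl
  | cons x p ih =>
    by_cases h : x = a
    · subst h
      simp only [List.flatMap_cons, List.filter_append, ih, List.filter_cons]
      have : (g.map (fun y => (x, y))).filter (fun z : α × α => z.1 ≠ x) = [] := by
        simp [List.filter_eq_nil_iff]
      simp [this]
    · simp only [List.flatMap_cons, List.filter_append, ih, List.filter_cons, h]
      have : (g.map (fun y => (x, y))).filter (fun z : α × α => z.1 ≠ a) = g.map (fun y => (x, y)) := by
        rw [List.filter_eq_self]
        intro z hz
        rcases List.mem_map.mp hz with ⟨y, _, rfl⟩
        simpa using h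
      simp [this, h]

-- Main distribution lemma: dedup of the product = product of the per-axis dedups.
theorem ofList_product (g : List Int) : ∀ (n : Nat) (p : List Int), p.length ≤ n →
    PySem.Set.ofList (p.flatMap (fun x => g.map (fun y => (x, y))))
      = (PySem.Set.ofList p).flatMap (fun x => (PySem.Set.ofList g).map (fun y => (x, y))) := by
  intro n
  induction n with
  | zero =>
    intro p hp
    have : p = [] := List.eq_nil_of_length_eq_zero (Nat.le_zero.mp hp)
    subst this; rfl
  | succ n ih =>
    intro p hp
    match p with
    | [] => rfl
    | a :: p =>
      have hsplit := ofList_append (g.map (fun y => (a, y)))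
        (p.flatMap (fun x => g.map (fun y => (x, y))))
      have hmapg : PySem.Set.ofList (g.map (fun y => (a, y)))
          = (PySem.Set.ofList g).map (fun y => (a, y)) := by
        refine ofList_map _ ?_ g
        intro u v huv; simpa using huv
      have hfilt : ((p.flatMap (fun x => g.map (fun y => (x, y)))).filter
            (fun z => ¬ (PySem.Set.ofList (g.map (fun y => (a, y)))).contains z))
          = ((p.flatMap (fun x => g.map (fun y => (x, y)))).filter (fun z => z.1 ≠ a)) := by
        apply List.filter_congr
        intro z hz
        rcases List.mem_flatMap.mp hz with ⟨x, _, hzx⟩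
        rcases List.mem_map.mp hzx with ⟨y, hyg, rfl⟩
        have hmem : ((x, y) ∈ PySem.Set.ofList (g.map (fun yy => (a, yy))))
            ↔ (x = a ∧ y ∈ g) := by
          rw [hmapg]
          constructor
          · intro hm
            rcases List.mem_map.mp hm with ⟨y', hy', he⟩
            have h1 : x = a := by simpa using (congrArg Prod.fst he).symm
            have h2 : y = y' := by simpa using (congrArg Prod.snd he).symm
            exact ⟨h1, h2 ▸ (by simpa [PySem.Set.ofList_eq_foldl] using
              (PySem.Set.mem_ofList (xs := g) (y := y')).mp hy')⟩
          · rintro ⟨rfl, hy⟩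
            exact List.mem_map_of_mem ((PySem.Set.mem_ofList (xs := g) (y := y)).mpr hy)
        simp only [List.contains_iff_mem]
        by_cases hxa : x = a
        · simp [hmem, hxa, hyg]
        · simp [hmem, hxa]
      have hlen : (p.filter (fun x => x ≠ a)).length ≤ n :=
        le_trans (List.length_filter_le _ _) (Nat.le_of_succ_le_succ hp)
      have hIH := ih (p.filter (fun x => x ≠ a)) hlen
      calc PySem.Set.ofList ((a :: p).flatMap (fun x => g.map (fun y => (x, y))))
          = PySem.Set.ofList (g.map (fun y => (a, y))
              ++ p.flatMap (fun x => g.map (fun y => (x, y)))) := by simp [List.flatMap_cons]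
        _ = (PySem.Set.ofList g).map (fun y => (a, y))
              ++ PySem.Set.ofList ((p.filter (fun x => x ≠ a)).flatMap
                  (fun x => g.map (fun y => (x, y)))) := by
            rw [hsplit, hfilt, filter_flatMap_fst, hmapg]
        _ = (PySem.Set.ofList g).map (fun y => (a, y))
              ++ (PySem.Set.ofList (p.filter (fun x => x ≠ a))).flatMap
                  (fun x => (PySem.Set.ofList g).map (fun y => (x, y))) := by rw [hIH]
        _ = (PySem.Set.ofList (a :: p)).flatMap
              (fun x => (PySem.Set.ofList g).map (fun y => (x, y))) := by
            rw [ofList_cons_filter]; simp [List.flatMap_cons]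

-- ===== VERDICT (by name: the statement is the Claim_ definition above) =====
theorem build_test_configs_spec : Claim_equal_build_test_configs := by
  intro p g _
  unfold Spec_build_test_configs build_test_configs build_test_configs_alt
  have hA := pvALoop_aux (p.flatMap (fun x => g.map (fun y => (x, y)))) ([] : List (Int × Int))
  simp only [PySem.Set.empty] at *
  rw [hA]
  show (p.flatMap (fun x => g.map (fun y => (x, y)))).foldl PySem.Set.add []
      = (PySem.List.dedup p).flatMap (fun x => (PySem.List.dedup g).map (fun y => (x, y)))
  rw [PySem.List.dedup_eq_ofList, PySem.List.dedup_eq_ofList]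
  exact ofList_product g p.length p le_rfl
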